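-- pv_equiv track=rewrite | github.com/Lukas-Santo-Puglisi/projectEulerAlgorithms | problem357.py | primeGenInts
-- ===== SOURCE A (Python) =====
-- from typing import List
-- import math
--
-- def sieve(n: int) -> List[bool]:
--
--     primes = [True] * (n+2)
--     for i in range(2, int(math.sqrt(n))+1):
--         if primes[i]:
--             for j in range(2*i, len(primes), i):
--                 primes[j] = False
--     return primes
--
-- def primeGenInts(n : int =10**9 ) -> int:
--     resultSum = 0
--     primes = sieve(n)
--     for n in range(1, len(primes)-1):
--         if not primes[n+1]:
--             continue
--         if primes[n+1]:
--             nDividedD = n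
--             isPrimeGenInt = True
--             for d in range(1, n):
--                 if n % d == 0:
--                     # we only check half of divisors
--                     if nDividedD == d:
--                         break
--                     nDividedD = n // d
--                     if not primes[ d + (n // d) ]:
--                         isPrimeGenInt = False
--                         break
--             if isPrimeGenInt:
--                 resultSum += n
--     return resultSum
-- ===== SOURCE B (Python) =====
-- from typing import List
-- import math
--
-- def sieve(n: int) -> List[bool]:
--     primes = [True] * (n+2)
--     for i in range(2, int(math.sqrt(n))+1):
--         if primes[i]:
--             for j in range(2*i, len(primes), i):
--                 primes[j] = False
--     return primes
--
-- def primeGenInts(n: int = 10**9) -> int: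
--     # Sieve-style batch marking instead of per-candidate divisor scans:
--     # start with good[m] = primes[m+1], then for every pair (d, q) with
--     # d*q <= n mark good[d*q] False when d+q is not prime.  Every divisor
--     # pair of every m <= n is visited exactly once, in O(n log n) total.
--     primes = sieve(n)
--     good = [primes[m + 1] for m in range(n + 1)]
--     for d in range(1, n + 1):
--         for q in range(1, n // d + 1):
--             if not primes[d + q]:
--                 good[d * q] = False
--     return sum(m for m in range(1, n + 1) if good[m])
-- ===== Notes on version B (the rewrite author's own statement) =====
-- stated objective: alternative
-- what changed: B replaces A's per-candidate divisor scan (for each m, walk every d < m with a tracked quotient and break) by an inverted, sieve-style batch marking: one good[] array initialised from primes[m+1], then every product pair (d, q) with d*q <= n is enumerated once and good[d*q] is cleared when d+q is not prime, followed by a final sum pass.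
import Mathlib
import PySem

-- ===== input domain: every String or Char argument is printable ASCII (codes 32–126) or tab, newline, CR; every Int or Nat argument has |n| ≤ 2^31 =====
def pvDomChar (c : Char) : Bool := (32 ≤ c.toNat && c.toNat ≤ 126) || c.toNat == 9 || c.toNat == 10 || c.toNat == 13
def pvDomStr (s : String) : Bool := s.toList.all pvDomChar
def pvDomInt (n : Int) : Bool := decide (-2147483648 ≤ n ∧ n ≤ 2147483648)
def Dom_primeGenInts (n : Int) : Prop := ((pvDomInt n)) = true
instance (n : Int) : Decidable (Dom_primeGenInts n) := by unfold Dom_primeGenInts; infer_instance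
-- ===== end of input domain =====

-- B inverts the loops: instead of A's per-candidate divisor scan it batch-marks a good[]
-- array over all product pairs (d, q) with d*q ≤ n, then sums (objective: alternative).

-- ===== PORT A =====
-- Python's list is an array: both ports carry the sieve as Array Bool (O(1) index and
-- assignment, like Python's list).  pvGetA a i is Python's a[i]: exact at every call site
-- below, since both programs only read indices 0 ≤ i < len(a).
def pvGetA (a : Array Bool) (i : Int) : Bool := a.getD i.toNat false

-- port of `sieve` (used verbatim by both Pythons).  Int.sqrt n = int(math.sqrt(n)) exactly
-- for 0 ≤ n ≤ 2^31 (Dom); setIfInBounds = Python's assignment (j is always in range).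
def pvSieve (n : Int) : Array Bool :=
  let primes := Array.replicate (n + 2).toNat true
  (PySem.List.pyRange 2 (Int.sqrt n + 1) 1).foldl
    (fun ps i =>
      if pvGetA ps i then
        (PySem.List.pyRange (2 * i) (ps.size : Int) i).foldl
          (fun ps2 j => ps2.setIfInBounds j.toNat false) ps
      else ps) primes

-- termination of A's inner for-loop, cited by name below
theorem pvInnerALoop_dec {m d : Int} (h : d < m) : (m - (d + 1)).toNat < (m - d).toNat := by
  omega

-- A's inner `for d in range(1, n)` loop with its two breaks; returns isPrimeGenInt.
def pvInnerALoop (primes : Array Bool) (m : Int) (d nD : Int) : Bool :=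
  if h : d < m then
    if PySem.Int.mod m d == 0 then
      if nD == d then true
      else if !(pvGetA primes (d + PySem.Int.floordiv m d)) then false
      else pvInnerALoop primes m (d + 1) (PySem.Int.floordiv m d)
    else pvInnerALoop primes m (d + 1) nD
  else true
termination_by (m - d).toNat
decreasing_by all_goals exact pvInnerALoop_dec h

def primeGenInts (n : Int) : Int :=
  let primes := pvSieve n
  (PySem.List.pyRange 1 ((primes.size : Int) - 1) 1).foldl
    (fun resultSum m =>
      if !(pvGetA primes (m + 1)) then resultSum
      else if pvGetA primes (m + 1) then
        (if pvInnerALoop primes m 1 m then resultSum + m else resultSum)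
      else resultSum) 0

-- ===== PORT B =====
-- B: good[m] := primes[m+1]; for every d and q ≤ n//d clear good[d*q] when d+q is not
-- prime; finally sum the surviving m.  (good[d*q] = False is setIfInBounds: d*q ≤ n.)
def primeGenInts_alt (n : Int) : Int :=
  let primes := pvSieve n
  let good0 := ((PySem.List.pyRange 0 (n + 1) 1).map (fun m => pvGetA primes (m + 1))).toArray
  let good := (PySem.List.pyRange 1 (n + 1) 1).foldl
    (fun g d =>
      (PySem.List.pyRange 1 (PySem.Int.floordiv n d + 1) 1).foldl
        (fun g2 q =>
          if !(pvGetA primes (d + q)) then g2.setIfInBounds (d * q).toNat false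
          else g2) g) good0
  (PySem.List.pyRange 1 (n + 1) 1).foldl
    (fun total m =>
      if pvGetA good m then total + m else total) 0

-- ===== PRECONDITION & SPEC =====
-- Pre_ excludes exactly the inputs n < 0, on which A raises ValueError (math.sqrt of a negative).
def Pre_primeGenInts (n : Int) : Prop := 0 ≤ n
instance (n : Int) : Decidable (Pre_primeGenInts n) := by unfold Pre_primeGenInts; infer_instance
def pvWitness_primeGenInts : Int := 30

def Spec_primeGenInts (n : Int) (out : Int) : Prop := out = primeGenInts_alt n
instance (n : Int) (out : Int) : Decidable (Spec_primeGenInts n out) := by unfold Spec_primeGenInts; infer_instance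

-- ===== CLAIM (what is proved, stated in full; the proofs are below) =====
def Claim_equal_primeGenInts : Prop := ∀ (n : Int), Dom_primeGenInts n → Pre_primeGenInts n → Spec_primeGenInts n (primeGenInts n)

-- ===== LEMMAS AND PROOFS =====

-- list-level mirror of A's inner loop, over the explicit range list
def pvInnerA (primes : List Bool) (m : Int) : List Int → Int → Bool
  | [], _ => true
  | d :: ds, nD =>
    if PySem.Int.mod m d == 0 then
      if nD == d then true
      else
        if !(PySem.List.pyGetD primes (d + PySem.Int.floordiv m d) false) then false
        else pvInnerA primes m ds (PySem.Int.floordiv m d)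
    else pvInnerA primes m ds nD

-- array lookups / folds are their list counterparts
lemma pvGetA_eq (a : Array Bool) (i : Int) (h : 0 ≤ i) :
    pvGetA a i = PySem.List.pyGetD a.toList i false := by
  have hi : i = ((i.toNat : Nat) : Int) := by omega
  rw [hi]
  rw [PySem.List.pyGetD_natCast]
  unfold pvGetA
  rw [Array.getD_eq_getD_getElem?, List.getD_eq_getElem?_getD, Array.getElem?_toList,
    Int.toNat_natCast]

lemma pvFoldl_toList {alpha : Type} (fa : Array Bool → alpha → Array Bool)
    (fl : List Bool → alpha → List Bool) :
    ∀ (l : List alpha), (∀ a x, x ∈ l → (fa a x).toList = fl a.toList x) →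
    ∀ (a : Array Bool), (l.foldl fa a).toList = l.foldl fl a.toList := by
  intro l
  induction l with
  | nil => intro _ a; rfl
  | cons x xs ih =>
    intro h a
    rw [List.foldl_cons, List.foldl_cons, ih (fun a y hy => h a y (List.mem_cons_of_mem _ hy)),
      h a x List.mem_cons_self]

-- "every divisor pair of m sums to a True sieve entry", over all divisors of m.
def pvS (P : List Bool) (m : Int) : Prop :=
  ∀ d : Int, 1 ≤ d → d ≤ m → d ∣ m → PySem.List.pyGetD P (d + m / d) false = true
-- the divisors below d0 have already been checked.
def pvChk (P : List Bool) (m d0 : Int) : Prop :=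
  ∀ d : Int, 1 ≤ d → d < d0 → d ∣ m → PySem.List.pyGetD P (d + m / d) false = true

lemma pvDivFacts {m d : Int} (hm : 1 ≤ m) (hd : 1 ≤ d) (hdvd : d ∣ m) :
    1 ≤ m / d ∧ (m / d) ∣ m ∧ m / (m / d) = d ∧ d * (m / d) = m := by
  obtain ⟨c, hc⟩ := hdvd
  have hd0 : d ≠ 0 := by omega
  have hdc : m / d = c := by rw [hc, Int.mul_ediv_cancel_left _ hd0]
  have hc1 : 1 ≤ c := by
    by_contra hcl
    rw [not_le] at hcl
    have h0 : d * c ≤ 0 :=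
      mul_nonpos_of_nonneg_of_nonpos (by omega) (by omega)
    linarith [hc ▸ hm]
  refine ⟨by omega, ⟨d, by rw [hdc, hc]; ring⟩, ?_, by rw [hdc]; omega⟩
  rw [hdc, hc, mul_comm, Int.mul_ediv_cancel_left _ (by omega : c ≠ 0)]

lemma pvMirror {m d : Int} (hm : 1 ≤ m) (hd : 1 ≤ d) (hdvd : d ∣ m) :
    (m / d) + m / (m / d) = d + m / d := by
  obtain ⟨-, -, h3, -⟩ := pvDivFacts hm hd hdvd
  omega

lemma pvDivAntitone {m d nD : Int} (hm : 1 ≤ m) (hnD : 1 ≤ nD) (hnDdvd : nD ∣ m)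
    (hd : nD ≤ d) (hdvd : d ∣ m) : m / d ≤ m / nD := by
  obtain ⟨he1, -, -, he4⟩ := pvDivFacts hm (by omega) hdvd
  obtain ⟨hg1, -, -, hg4⟩ := pvDivFacts hm hnD hnDdvd
  by_contra hlt
  rw [not_le] at hlt
  nlinarith

-- invariant of A's inner loop: nD is m / (last divisor seen), every divisor < d0 checked
lemma pvInnerA_iff (P : List Bool) (m : Int) (hm : 2 ≤ m) :
    ∀ k : Nat, ∀ d0 nD : Int, (m - d0).toNat = k → 2 ≤ d0 → nD ∣ m → 1 ≤ nD →
    m / nD < d0 → pvChk P m d0 →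
    (pvInnerA P m (PySem.List.pyRange d0 m 1) nD = true ↔ pvS P m) := by
  intro k
  induction k with
  | zero =>
    intro d0 nD hk hd0 hnDdvd hnD1 hinv hchk
    rw [PySem.List.pyRange_one_eq_nil (by omega : m ≤ d0)]
    constructor
    · intro _ d hd1 hdm hdvd
      rcases lt_or_ge d d0 with h | h
      · exact hchk d hd1 h hdvd
      · have hdm' : d = m := by omega
        have h1 : PySem.List.pyGetD P (1 + m / 1) false = true :=
          hchk 1 le_rfl (by omega) (one_dvd m)
        rw [Int.ediv_one] at h1
        rw [hdm', Int.ediv_self (by omega : m ≠ 0), show m + 1 = 1 + m by omega]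
        exact h1
    · intro _; trivial
  | succ k ih =>
    intro d0 nD hk hd0 hnDdvd hnD1 hinv hchk
    have hd0m : d0 < m := by omega
    rw [PySem.List.pyRange_one_cons hd0m]
    by_cases hdvd : d0 ∣ m
    · have hmod : (PySem.Int.mod m d0 == 0) = true := by
        rw [beq_iff_eq]
        exact (PySem.Int.mod_eq_zero_iff_dvd m d0).2 hdvd
      have hfd : PySem.Int.floordiv m d0 = m / d0 :=
        PySem.Int.floordiv_eq_ediv_of_pos (by omega : (0:Int) < d0)
      by_cases hbr : nD = d0
      · -- the `nDividedD == d` break: everything still unchecked mirrors a checked divisor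
        have hbeq : (nD == d0) = true := by rw [beq_iff_eq]; exact hbr
        simp only [pvInnerA, hmod, hbeq, if_true]
        constructor
        · intro _ d hd1 hdm hdvd'
          rcases lt_or_ge d d0 with h | h
          · exact hchk d hd1 h hdvd'
          · have hmir := pvMirror (by omega : (1:Int) ≤ m) hd1 hdvd'
            have hle : m / d ≤ m / nD :=
              pvDivAntitone (by omega) hnD1 hnDdvd (by omega) hdvd'
            obtain ⟨he1, he2, -, -⟩ := pvDivFacts (by omega : (1:Int) ≤ m) hd1 hdvd'
            have hc := hchk (m / d) he1 (by omega) he2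
            rwa [hmir] at hc
        · intro _; trivial
      · have hbeq : (nD == d0) = false := by rw [beq_eq_false_iff_ne]; exact hbr
        obtain ⟨hq1, hq2, hq3, -⟩ := pvDivFacts (by omega : (1:Int) ≤ m) (by omega) hdvd
        by_cases hpr : PySem.List.pyGetD P (d0 + m / d0) false = true
        · simp only [pvInnerA, hmod, hbeq, hfd, hpr, Bool.not_true, if_true,
            Bool.false_eq_true, if_false]
          apply ih (d0 + 1) (m / d0) (by omega) (by omega) hq2 hq1 (by omega)
          intro d hd1 hdlt hdvd'
          rcases lt_or_ge d d0 with h | h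
          · exact hchk d hd1 h hdvd'
          · have hdd : d = d0 := by omega
            rw [hdd]; exact hpr
        · have hpr' : PySem.List.pyGetD P (d0 + m / d0) false = false := by
            revert hpr; cases PySem.List.pyGetD P (d0 + m / d0) false <;> simp
          simp only [pvInnerA, hmod, hbeq, hfd, hpr', Bool.not_false,
            if_true, Bool.false_eq_true, if_false]
          constructor
          · intro habs; exact absurd habs (by simp)
          · intro hS
            have := hS d0 (by omega) (by omega) hdvd
            rw [this] at hpr'
            cases hpr'
    · have hmod : (PySem.Int.mod m d0 == 0) = false := by
        rw [beq_eq_false_iff_ne]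
        intro h
        exact hdvd ((PySem.Int.mod_eq_zero_iff_dvd m d0).1 h)
      simp only [pvInnerA, hmod, Bool.false_eq_true, if_false]
      apply ih (d0 + 1) nD (by omega) (by omega) hnDdvd hnD1 (by omega)
      intro d hd1 hdlt hdvd'
      rcases lt_or_ge d d0 with h | h
      · exact hchk d hd1 h hdvd'
      · have hdd : d = d0 := by omega
        rw [hdd] at hdvd'
        exact absurd hdvd' hdvd

-- A's candidate test equals "every divisor pair sums to a True entry", given primes[m+1]
lemma pvInnerA_true_iff (P : List Bool) (m : Int) (h1 : 1 ≤ m)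
    (hg : PySem.List.pyGetD P (m + 1) false = true) :
    (pvInnerA P m (PySem.List.pyRange 1 m 1) m = true ↔ pvS P m) := by
  rcases eq_or_lt_of_le h1 with h1' | h2
  · -- m = 1: both sides hold
    have hm1 : m = 1 := h1'.symm
    subst hm1
    rw [PySem.List.pyRange_one_eq_nil le_rfl]
    constructor
    · intro _ d hd1 hdm hdvd
      have hdd : d = 1 := by omega
      subst hdd
      simpa using hg
    · intro _; rfl
  · have hm2 : 2 ≤ m := by omega
    rw [PySem.List.pyRange_one_cons (by omega : (1:Int) < m)]
    have hmod : (PySem.Int.mod m 1 == 0) = true := by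
      rw [beq_iff_eq]
      exact (PySem.Int.mod_eq_zero_iff_dvd m 1).2 (one_dvd m)
    have hbeq : (m == (1:Int)) = false := by
      rw [beq_eq_false_iff_ne]; omega
    have hfd : PySem.Int.floordiv m 1 = m := by
      rw [PySem.Int.floordiv_eq_ediv_of_pos (by omega : (0:Int) < 1), Int.ediv_one]
    have hg' : PySem.List.pyGetD P (1 + m) false = true := by
      rw [add_comm]; exact hg
    simp only [pvInnerA, hmod, hbeq, hfd, hg', Bool.not_true,
      if_true, Bool.false_eq_true, if_false]
    rw [show (1:Int) + 1 = 2 by norm_num]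
    exact pvInnerA_iff P m hm2 (m - 2).toNat 2 m rfl le_rfl dvd_rfl (by omega)
      (by rw [Int.ediv_self (by omega : m ≠ 0)]; omega)
      (by
        intro d hd1 hdlt hdvd
        have hdd : d = 1 := by omega
        rw [hdd, Int.ediv_one, add_comm]
        exact hg)

-- ---- B side: the marking sieve ----

-- one marking step of B's double loop
def pvMark (P : List Bool) (g : List Bool) (p : Int × Int) : List Bool :=
  if !(PySem.List.pyGetD P (p.1 + p.2) false) then PySem.List.pySetD g (p.1 * p.2) false
  else g

-- the flat list of pairs B's double loop visits
def pvPairs (n : Int) : List (Int × Int) :=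
  (PySem.List.pyRange 1 (n + 1) 1).flatMap
    (fun d => (PySem.List.pyRange 1 (PySem.Int.floordiv n d + 1) 1).map (fun q => (d, q)))

lemma pvMark_length (P g : List Bool) (p : Int × Int) : (pvMark P g p).length = g.length := by
  unfold pvMark
  split
  · exact PySem.List.length_pySetD ..
  · rfl

lemma pvMem_pvPairs {n d q : Int} :
    (d, q) ∈ pvPairs n ↔ 1 ≤ d ∧ d < n + 1 ∧ 1 ≤ q ∧ q < PySem.Int.floordiv n d + 1 := by
  unfold pvPairs
  simp only [List.mem_flatMap, List.mem_map, PySem.List.mem_pyRange_one, Prod.mk.injEq]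
  constructor
  · rintro ⟨d', ⟨hd1, hd2⟩, q', ⟨hq1, hq2⟩, hde, hqe⟩
    subst hde; subst hqe
    exact ⟨hd1, hd2, hq1, hq2⟩
  · rintro ⟨hd1, hd2, hq1, hq2⟩
    exact ⟨d, ⟨hd1, hd2⟩, q, ⟨hq1, hq2⟩, rfl, rfl⟩

-- the central invariant: after marking a pair list L, good[m] is its old value minus
-- the pairs of product m whose sum is not a True sieve entry
lemma pvMark_get (P : List Bool) :
    ∀ (L : List (Int × Int)) (g : List Bool) (m : Int),
    (∀ p ∈ L, 1 ≤ p.1 ∧ 1 ≤ p.2) → 0 ≤ m → m < (g.length : Int) →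
    (PySem.List.pyGetD (L.foldl (pvMark P) g) m false = true ↔
      (PySem.List.pyGetD g m false = true ∧
        ∀ p ∈ L, p.1 * p.2 = m → PySem.List.pyGetD P (p.1 + p.2) false = true)) := by
  intro L
  induction L with
  | nil =>
    intro g m _ _ _
    simp
  | cons p L ih =>
    intro g m hpos hm0 hmlen
    obtain ⟨hp1, hp2⟩ := hpos p List.mem_cons_self
    have hprod : (1:Int) ≤ p.1 * p.2 := one_le_mul_of_one_le_of_one_le hp1 hp2
    rw [List.foldl_cons]
    rw [ih (pvMark P g p) m (fun q hq => hpos q (List.mem_cons_of_mem _ hq)) hm0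
      (by rw [pvMark_length]; exact hmlen)]
    by_cases hP : PySem.List.pyGetD P (p.1 + p.2) false = true
    · have hmk : pvMark P g p = g := by
        unfold pvMark
        rw [hP]
        simp
      rw [hmk]
      constructor
      · rintro ⟨h1, h2⟩
        refine ⟨h1, ?_⟩
        intro q hq hqm
        rcases List.mem_cons.1 hq with hq | hq
        · rw [hq]; exact hP
        · exact h2 q hq hqm
      · rintro ⟨h1, h2⟩
        exact ⟨h1, fun q hq hqm => h2 q (List.mem_cons_of_mem _ hq) hqm⟩
    · have hP' : PySem.List.pyGetD P (p.1 + p.2) false = false := by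
        revert hP; cases PySem.List.pyGetD P (p.1 + p.2) false <;> simp
      have hmk : pvMark P g p = g.set (p.1 * p.2).toNat false := by
        unfold pvMark
        rw [hP']
        simp [PySem.List.pySetD_of_nonneg g false (by omega : (0:Int) ≤ p.1 * p.2)]
      rw [hmk]
      by_cases heq : p.1 * p.2 = m
      · have hset : PySem.List.pyGetD (g.set (p.1 * p.2).toNat false) m false = false := by
          have hlen1 : m < (((g.set (p.1 * p.2).toNat false).length : Nat) : Int) := by
            rw [List.length_set]; exact hmlen
          rw [PySem.List.pyGetD_eq_getElem (g.set (p.1 * p.2).toNat false) false hm0 hlen1]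
          simp [show (p.1 * p.2).toNat = m.toNat from by omega]
        rw [hset]
        constructor
        · rintro ⟨h1, -⟩; cases h1
        · rintro ⟨-, h2⟩
          have := h2 p List.mem_cons_self heq
          rw [this] at hP'
          cases hP'
      · have hset : PySem.List.pyGetD (g.set (p.1 * p.2).toNat false) m false =
            PySem.List.pyGetD g m false := by
          have hlen1 : m < (((g.set (p.1 * p.2).toNat false).length : Nat) : Int) := by
            rw [List.length_set]; exact hmlen
          rw [PySem.List.pyGetD_eq_getElem (g.set (p.1 * p.2).toNat false) false hm0 hlen1,
            PySem.List.pyGetD_eq_getElem g false hm0 hmlen]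
          exact List.getElem_set_ne (by omega) _
        rw [hset]
        constructor
        · rintro ⟨h1, h2⟩
          refine ⟨h1, ?_⟩
          intro q hq hqm
          rcases List.mem_cons.1 hq with hq | hq
          · exact absurd (hq ▸ hqm) heq
          · exact h2 q hq hqm
        · rintro ⟨h1, h2⟩
          exact ⟨h1, fun q hq hqm => h2 q (List.mem_cons_of_mem _ hq) hqm⟩

-- B's pair enumeration covers exactly the divisor pairs of each m ≤ n
lemma pvPairs_iff (P : List Bool) (n m : Int) (h1 : 1 ≤ m) (hm : m ≤ n) :
    ((∀ p ∈ pvPairs n, p.1 * p.2 = m → PySem.List.pyGetD P (p.1 + p.2) false = true) ↔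
      pvS P m) := by
  constructor
  · intro hL d hd1 hdm hdvd
    obtain ⟨hq1, -, -, hq4⟩ := pvDivFacts (by omega : (1:Int) ≤ m) hd1 hdvd
    have hfd : PySem.Int.floordiv n d = n / d :=
      PySem.Int.floordiv_eq_ediv_of_pos (by omega : (0:Int) < d)
    have hqle : m / d ≤ n / d := by
      rw [Int.le_ediv_iff_mul_le (by omega : (0:Int) < d)]
      nlinarith
    exact hL (d, m / d) (pvMem_pvPairs.2 ⟨hd1, by omega, hq1, by omega⟩) hq4
  · rintro hS ⟨d, q⟩ hp hqm
    obtain ⟨hd1, -, hq1, -⟩ := pvMem_pvPairs.1 hp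
    simp only at hqm hd1 hq1 ⊢
    have hdvd : d ∣ m := ⟨q, hqm.symm⟩
    have hdm : d ≤ m := by nlinarith
    have hq : m / d = q := by
      rw [← hqm, Int.mul_ediv_cancel_left _ (by omega : d ≠ 0)]
    have := hS d hd1 hdm hdvd
    rwa [hq] at this

lemma pvAFoldl_size {alpha : Type} (f : Array Bool → alpha → Array Bool)
    (hf : ∀ a x, (f a x).size = a.size) :
    ∀ (l : List alpha) (a : Array Bool), (l.foldl f a).size = a.size := by
  intro l
  induction l with
  | nil => intro a; rfl
  | cons x xs ih => intro a; rw [List.foldl_cons, ih, hf]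

lemma pvSieve_size (n : Int) : (pvSieve n).size = (n + 2).toNat := by
  unfold pvSieve
  rw [pvAFoldl_size]
  · exact Array.size_replicate
  · intro a x
    split
    · exact pvAFoldl_size _ (fun a x => Array.size_setIfInBounds ..) _ _
    · rfl

-- A's loop over the array is the list-level mirror over the explicit range
lemma pvInnerALoop_eq (primes : Array Bool) (m : Int) :
    ∀ k : Nat, ∀ d nD : Int, (m - d).toNat = k → 1 ≤ d →
    pvInnerALoop primes m d nD = pvInnerA primes.toList m (PySem.List.pyRange d m 1) nD := by
  intro k
  induction k with
  | zero =>
    intro d nD hk hd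
    rw [pvInnerALoop, dif_neg (by omega : ¬ d < m),
      PySem.List.pyRange_one_eq_nil (by omega : m ≤ d)]
    rfl
  | succ k ih =>
    intro d nD hk hd
    have hdm : d < m := by omega
    rw [pvInnerALoop, dif_pos hdm, PySem.List.pyRange_one_cons hdm]
    unfold pvInnerA
    have hget : pvGetA primes (d + PySem.Int.floordiv m d) =
        PySem.List.pyGetD primes.toList (d + PySem.Int.floordiv m d) false := by
      apply pvGetA_eq
      have : 0 ≤ PySem.Int.floordiv m d := by
        rw [PySem.Int.floordiv_eq_ediv_of_pos (by omega : (0:Int) < d)]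
        exact Int.ediv_nonneg (by omega) (by omega)
      omega
    rw [hget, ih (d + 1) (PySem.Int.floordiv m d) (by omega) (by omega),
      ih (d + 1) nD (by omega) (by omega)]

-- the double marking loop of B is the flat fold over pvPairs
lemma pvNested_eq (P g0 : List Bool) (n : Int) :
    (PySem.List.pyRange 1 (n + 1) 1).foldl
      (fun g d =>
        (PySem.List.pyRange 1 (PySem.Int.floordiv n d + 1) 1).foldl
          (fun g2 q =>
            if !(PySem.List.pyGetD P (d + q) false) then
              PySem.List.pySetD g2 (d * q) false
            else g2) g) g0 =
    (pvPairs n).foldl (pvMark P) g0 := by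
  unfold pvPairs
  rw [List.foldl_flatMap]
  apply PySem.List.foldl_congr_mem
  intro g d _
  rw [List.foldl_map]
  apply PySem.List.foldl_congr_mem
  intro g2 q _
  rfl

-- good[m] after B's marking pass, for 1 ≤ m ≤ n
lemma pvGood_iff (P : List Bool) (n m : Int) (h1 : 1 ≤ m) (hm : m ≤ n) :
    (PySem.List.pyGetD
      ((pvPairs n).foldl (pvMark P)
        ((PySem.List.pyRange 0 (n + 1) 1).map
          (fun m => PySem.List.pyGetD P (m + 1) false))) m false = true ↔
      (PySem.List.pyGetD P (m + 1) false = true ∧ pvS P m)) := by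
  have hlen : (((PySem.List.pyRange 0 (n + 1) 1).map
      (fun m => PySem.List.pyGetD P (m + 1) false)).length : Int) = n + 1 := by
    rw [List.length_map, PySem.List.length_pyRange_one]
    omega
  rw [pvMark_get P (pvPairs n) _ m
    (by
      rintro ⟨d, q⟩ hp
      obtain ⟨hd1, -, hq1, -⟩ := pvMem_pvPairs.1 hp
      exact ⟨hd1, hq1⟩)
    (by omega) (by omega),
    PySem.List.pyGetD_map_pyRange_of_nonneg _ (n + 1) m false (by omega) (by omega),
    pvPairs_iff P n m h1 hm]

-- the two outer folds agree, over a generalized sieve list P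
lemma pvMain (P : List Bool) (n : Int) (hlen : ((P.length : Int)) - 1 = n + 1) :
    (PySem.List.pyRange 1 ((P.length : Int) - 1) 1).foldl
      (fun resultSum m =>
        if !(PySem.List.pyGetD P (m + 1) false) then resultSum
        else if PySem.List.pyGetD P (m + 1) false then
          (if pvInnerA P m (PySem.List.pyRange 1 m 1) m then resultSum + m else resultSum)
        else resultSum) 0 =
    (PySem.List.pyRange 1 (n + 1) 1).foldl
      (fun total m =>
        if PySem.List.pyGetD
            ((PySem.List.pyRange 1 (n + 1) 1).foldl
              (fun g d =>
                (PySem.List.pyRange 1 (PySem.Int.floordiv n d + 1) 1).foldl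
                  (fun g2 q =>
                    if !(PySem.List.pyGetD P (d + q) false) then
                      PySem.List.pySetD g2 (d * q) false
                    else g2) g)
              ((PySem.List.pyRange 0 (n + 1) 1).map
                (fun m => PySem.List.pyGetD P (m + 1) false))) m false then total + m
        else total) 0 := by
  rw [hlen, pvNested_eq]
  apply PySem.List.foldl_congr_mem
  intro acc m hmem
  obtain ⟨hm1, hm2⟩ := PySem.List.mem_pyRange_one.1 hmem
  by_cases hg : PySem.List.pyGetD P (m + 1) false = true
  · simp only [hg, Bool.not_true, Bool.false_eq_true, if_false, if_true]
    by_cases hA : pvInnerA P m (PySem.List.pyRange 1 m 1) m = true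
    · have hgood : PySem.List.pyGetD
          ((pvPairs n).foldl (pvMark P)
            ((PySem.List.pyRange 0 (n + 1) 1).map
              (fun m => PySem.List.pyGetD P (m + 1) false))) m false = true :=
        (pvGood_iff P n m hm1 (by omega)).2 ⟨hg, (pvInnerA_true_iff P m hm1 hg).1 hA⟩
      rw [hA, hgood]
    · have hA' : pvInnerA P m (PySem.List.pyRange 1 m 1) m = false := by
        revert hA; cases pvInnerA P m (PySem.List.pyRange 1 m 1) m <;> simp
      have hgood : ¬ (PySem.List.pyGetD
          ((pvPairs n).foldl (pvMark P)
            ((PySem.List.pyRange 0 (n + 1) 1).map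
              (fun m => PySem.List.pyGetD P (m + 1) false))) m false = true) := by
        intro h
        have := ((pvGood_iff P n m hm1 (by omega)).1 h).2
        rw [(pvInnerA_true_iff P m hm1 hg).2 this] at hA'
        cases hA'
      rw [hA', Bool.eq_false_iff.2 hgood]
  · have hg' : PySem.List.pyGetD P (m + 1) false = false := by
      revert hg; cases PySem.List.pyGetD P (m + 1) false <;> simp
    have hgood : ¬ (PySem.List.pyGetD
        ((pvPairs n).foldl (pvMark P)
          ((PySem.List.pyRange 0 (n + 1) 1).map
            (fun m => PySem.List.pyGetD P (m + 1) false))) m false = true) := by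
      intro h
      have := ((pvGood_iff P n m hm1 (by omega)).1 h).1
      rw [this] at hg'
      cases hg'
    rw [Bool.eq_false_iff.2 hgood]
    simp [hg']

-- the array ports compute the two list-level folds of pvMain
lemma pvA_to_list (n : Int) :
    primeGenInts n =
    (PySem.List.pyRange 1 (((pvSieve n).toList.length : Int) - 1) 1).foldl
      (fun resultSum m =>
        if !(PySem.List.pyGetD (pvSieve n).toList (m + 1) false) then resultSum
        else if PySem.List.pyGetD (pvSieve n).toList (m + 1) false then
          (if pvInnerA (pvSieve n).toList m (PySem.List.pyRange 1 m 1) m then resultSum + m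
           else resultSum)
        else resultSum) 0 := by
  unfold primeGenInts
  show (PySem.List.pyRange 1 (((pvSieve n).size : Int) - 1) 1).foldl
      (fun resultSum m =>
        if !(pvGetA (pvSieve n) (m + 1)) then resultSum
        else if pvGetA (pvSieve n) (m + 1) then
          (if pvInnerALoop (pvSieve n) m 1 m then resultSum + m else resultSum)
        else resultSum) 0 = _
  rw [show ((pvSieve n).size : Int) = ((pvSieve n).toList.length : Int) by
    rw [Array.length_toList]]
  apply PySem.List.foldl_congr_mem
  intro acc m hmem
  obtain ⟨hm1, -⟩ := PySem.List.mem_pyRange_one.1 hmem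
  rw [pvGetA_eq _ _ (by omega), pvInnerALoop_eq (pvSieve n) m (m - 1).toNat 1 m rfl le_rfl]

lemma pvB_to_list (n : Int) :
    primeGenInts_alt n =
    (PySem.List.pyRange 1 (n + 1) 1).foldl
      (fun total m =>
        if PySem.List.pyGetD
            ((PySem.List.pyRange 1 (n + 1) 1).foldl
              (fun g d =>
                (PySem.List.pyRange 1 (PySem.Int.floordiv n d + 1) 1).foldl
                  (fun g2 q =>
                    if !(PySem.List.pyGetD (pvSieve n).toList (d + q) false) then
                      PySem.List.pySetD g2 (d * q) false
                    else g2) g)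
              ((PySem.List.pyRange 0 (n + 1) 1).map
                (fun m => PySem.List.pyGetD (pvSieve n).toList (m + 1) false))) m false
          then total + m
        else total) 0 := by
  unfold primeGenInts_alt
  show (PySem.List.pyRange 1 (n + 1) 1).foldl
      (fun total m =>
        if pvGetA
            ((PySem.List.pyRange 1 (n + 1) 1).foldl
              (fun g d =>
                (PySem.List.pyRange 1 (PySem.Int.floordiv n d + 1) 1).foldl
                  (fun g2 q =>
                    if !(pvGetA (pvSieve n) (d + q)) then g2.setIfInBounds (d * q).toNat false
                    else g2) g)
              ((PySem.List.pyRange 0 (n + 1) 1).map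
                (fun m => pvGetA (pvSieve n) (m + 1))).toArray) m then total + m
        else total) 0 = _
  have hgood : ((PySem.List.pyRange 1 (n + 1) 1).foldl
      (fun g d =>
        (PySem.List.pyRange 1 (PySem.Int.floordiv n d + 1) 1).foldl
          (fun g2 q =>
            if !(pvGetA (pvSieve n) (d + q)) then g2.setIfInBounds (d * q).toNat false
            else g2) g)
      ((PySem.List.pyRange 0 (n + 1) 1).map (fun m => pvGetA (pvSieve n) (m + 1))).toArray).toList =
      (PySem.List.pyRange 1 (n + 1) 1).foldl
        (fun g d =>
          (PySem.List.pyRange 1 (PySem.Int.floordiv n d + 1) 1).foldl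
            (fun g2 q =>
              if !(PySem.List.pyGetD (pvSieve n).toList (d + q) false) then
                PySem.List.pySetD g2 (d * q) false
              else g2) g)
        ((PySem.List.pyRange 0 (n + 1) 1).map
          (fun m => PySem.List.pyGetD (pvSieve n).toList (m + 1) false)) := by
    rw [pvFoldl_toList]
    · rw [List.toList_toArray]
      congr 1
      apply List.map_congr_left
      intro m hm
      obtain ⟨hm0, -⟩ := PySem.List.mem_pyRange_one.1 hm
      rw [pvGetA_eq _ _ (by omega)]
    · intro g d hd
      obtain ⟨hd1, -⟩ := PySem.List.mem_pyRange_one.1 hd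
      rw [pvFoldl_toList]
      intro g2 q hq
      obtain ⟨hq1, -⟩ := PySem.List.mem_pyRange_one.1 hq
      rw [pvGetA_eq _ _ (by omega)]
      split
      · rw [Array.toList_setIfInBounds,
          PySem.List.pySetD_of_nonneg g2.toList false (by positivity : (0:Int) ≤ d * q)]
      · rfl
  apply PySem.List.foldl_congr_mem
  intro acc m hmem
  obtain ⟨hm1, -⟩ := PySem.List.mem_pyRange_one.1 hmem
  rw [pvGetA_eq _ _ (by omega), hgood]

-- ===== VERDICT (by name: the statement is the Claim_ definition above) =====
theorem primeGenInts_spec : Claim_equal_primeGenInts := by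
  intro n _ hpre
  have hn : (0:Int) ≤ n := hpre
  unfold Spec_primeGenInts
  rw [pvA_to_list n, pvB_to_list n,
    pvMain ((pvSieve n).toList) n (by rw [Array.length_toList, pvSieve_size]; omega)]
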